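-- pv_equiv track=rewrite | github.com/MuffinC/Leetcodestore | python/Dailies/number of distinct islands.py | dfs
-- ===== SOURCE A (Python) =====
-- def dfs( g, i, j, path):
--     if i < 0 or j < 0 or i >= len(g) or j >= len(g[i]) or g[i][j] == 0:
--         return ""
--
--     g[i][j] = 0
--     return path \
--            + dfs(g, i + 1, j, "d") + "u" \
--            + dfs(g, i - 1, j, "u") + "d" \
--            + dfs(g, i, j + 1, "r") + "l" \
--            + dfs(g, i, j - 1, "l") + "r"
-- ===== SOURCE B (Python) =====
-- def dfs(g, i, j, path):
--     out = []
--     stack = [("visit", i, j, path)]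
--     while stack:
--         item = stack.pop()
--         if item[0] == "emit":
--             out.append(item[1])
--         else:
--             _, ci, cj, p = item
--             if ci < 0 or cj < 0 or ci >= len(g) or cj >= len(g[ci]) or g[ci][cj] == 0:
--                 continue
--             g[ci][cj] = 0
--             out.append(p)
--             stack.extend([("emit", "r"), ("visit", ci, cj - 1, "l"),
--                           ("emit", "l"), ("visit", ci, cj + 1, "r"),
--                           ("emit", "d"), ("visit", ci - 1, cj, "u"),
--                           ("emit", "u"), ("visit", ci + 1, cj, "d")])
--     return "".join(out)
-- ===== Notes on version B (the rewrite author's own statement) =====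
-- stated objective: alternative
-- what changed: Replaces A's four-way recursion by an explicit work stack of visit/emit tokens iterated in a single while loop (same down-up-right-left order and closing markers), collecting output pieces in a list joined once at the end.
import Mathlib
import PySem

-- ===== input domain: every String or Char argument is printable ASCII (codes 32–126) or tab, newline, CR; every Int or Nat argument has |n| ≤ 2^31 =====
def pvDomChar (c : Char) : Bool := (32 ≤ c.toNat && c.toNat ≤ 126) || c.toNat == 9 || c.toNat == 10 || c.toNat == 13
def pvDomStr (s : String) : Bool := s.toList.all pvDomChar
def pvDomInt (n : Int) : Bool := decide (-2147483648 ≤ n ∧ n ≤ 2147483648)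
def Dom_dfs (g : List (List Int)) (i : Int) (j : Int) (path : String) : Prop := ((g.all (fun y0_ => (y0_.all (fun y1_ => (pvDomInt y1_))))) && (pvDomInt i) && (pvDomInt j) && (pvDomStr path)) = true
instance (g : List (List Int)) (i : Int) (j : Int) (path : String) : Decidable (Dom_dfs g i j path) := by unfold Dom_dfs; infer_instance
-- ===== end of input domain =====

-- B replaces A's recursion by an explicit work stack of visit/emit tokens (same visit and
-- marker order), objective: alternative decomposition. Both Pythons mutate g identically;
-- the equivalence proved here is about the return value (the Lean ports thread the grid
-- explicitly as state).

-- ===== PORT A =====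
-- shared state helpers (the Python mutates g in place; the ports thread it explicitly)
def pvRow (g : List (List Int)) (i : Int) : List Int := g.getD i.toNat []

def pvCell (g : List (List Int)) (i : Int) (j : Int) : Int := (pvRow g i).getD j.toNat 0

-- the guard of A's first line (all five disjuncts in Python's order)
def pvBlocked (g : List (List Int)) (i : Int) (j : Int) : Bool :=
  decide (i < 0) || decide (j < 0) || decide ((g.length : Int) ≤ i) ||
    decide (((pvRow g i).length : Int) ≤ j) || decide (pvCell g i j = 0)

-- g[i][j] = 0
def pvSet (g : List (List Int)) (i : Int) (j : Int) : List (List Int) :=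
  g.modify i.toNat (fun r => r.set j.toNat 0)

-- number of nonzero cells: the termination measure (each claimed cell is zeroed)
def pvNZRow (r : List Int) : Nat := r.countP (fun x => decide (x ≠ 0))

def pvNZ (g : List (List Int)) : Nat := (g.map pvNZRow).sum

theorem pvNZRow_set_lt (r : List Int) (j : Nat) (hj : j < r.length) (hnz : r.getD j 0 ≠ 0) :
    pvNZRow (r.set j 0) < pvNZRow r := by
  induction r generalizing j with
  | nil => simp at hj
  | cons a t ih =>
    cases j with
    | zero =>
      simp only [List.set_cons_zero, pvNZRow, List.countP_cons, List.getD_cons_zero] at *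
      simp [hnz]
    | succ j =>
      simp at hj
      simp only [List.getD_cons_succ] at hnz
      have := ih j hj hnz
      simp only [List.set_cons_succ, pvNZRow, List.countP_cons] at *
      omega

theorem pvNZ_modify_lt (g : List (List Int)) (I J : Nat) (hi : I < g.length)
    (hj : J < (g.getD I []).length) (hnz : (g.getD I []).getD J 0 ≠ 0) :
    pvNZ (g.modify I (fun r => r.set J 0)) < pvNZ g := by
  induction g generalizing I with
  | nil => simp at hi
  | cons r t ih =>
    cases I with
    | zero =>
      simp only [List.getD_cons_zero] at hj hnz
      have := pvNZRow_set_lt r J hj hnz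
      simp [pvNZ, List.modify]
      omega
    | succ I =>
      simp at hi
      simp only [List.getD_cons_succ] at hj hnz
      have := ih I hi hj hnz
      simp [pvNZ, List.modify] at *
      omega

theorem pvNZ_set_lt (g : List (List Int)) (i : Int) (j : Int)
    (hb : ¬ pvBlocked g i j = true) : pvNZ (pvSet g i j) < pvNZ g := by
  simp only [pvBlocked, Bool.or_eq_true, decide_eq_true_eq, not_or] at hb
  obtain ⟨⟨⟨⟨hi0, hj0⟩, hil⟩, hjl⟩, hnz⟩ := hb
  unfold pvRow at hjl
  unfold pvCell pvRow at hnz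
  exact pvNZ_modify_lt g i.toNat j.toNat (by omega) (by omega) hnz

-- dfsB threads the mutated grid and carries the measure bound needed for termination
def dfsB (g : List (List Int)) (i : Int) (j : Int) (path : String) :
    { r : String × List (List Int) // pvNZ r.2 ≤ pvNZ g } :=
  if h : pvBlocked g i j then ⟨("", g), le_refl _⟩
  else
    have h1 : pvNZ (pvSet g i j) < pvNZ g := pvNZ_set_lt g i j h
    match dfsB (pvSet g i j) (i + 1) j "d" with
    | ⟨(s1, g2), p2⟩ =>
      match dfsB g2 (i - 1) j "u" with
      | ⟨(s2, g3), p3⟩ =>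
        match dfsB g3 i (j + 1) "r" with
        | ⟨(s3, g4), p4⟩ =>
          match dfsB g4 i (j - 1) "l" with
          | ⟨(s4, g5), p5⟩ =>
            ⟨(path ++ s1 ++ "u" ++ s2 ++ "d" ++ s3 ++ "l" ++ s4 ++ "r", g5),
              le_trans p5 (le_trans p4 (le_trans p3 (le_trans p2 (le_of_lt h1))))⟩
termination_by pvNZ g
decreasing_by
  · exact h1
  · exact lt_of_le_of_lt p2 h1
  · exact lt_of_le_of_lt (le_trans p3 p2) h1
  · exact lt_of_le_of_lt (le_trans p4 (le_trans p3 p2)) h1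

def dfs (g : List (List Int)) (i : Int) (j : Int) (path : String) : String :=
  (dfsB g i j path).1.1

-- ===== PORT B =====
-- a stack item: a cell still to visit (with its incoming marker) or a literal to append
inductive PvItem where
  | visit : Int → Int → String → PvItem
  | emit : String → PvItem

-- the while loop over the explicit stack (list head = top of stack)
def pvRun (g : List (List Int)) (st : List PvItem) (acc : String) : String :=
  match st with
  | [] => acc
  | .emit s :: rest => pvRun g rest (acc ++ s)
  | .visit i j p :: rest =>
    if h : pvBlocked g i j then pvRun g rest acc
    else
      have hdec : pvNZ (pvSet g i j) < pvNZ g := pvNZ_set_lt g i j h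
      pvRun (pvSet g i j)
        (.visit (i + 1) j "d" :: .emit "u" :: .visit (i - 1) j "u" :: .emit "d" ::
         .visit i (j + 1) "r" :: .emit "l" :: .visit i (j - 1) "l" :: .emit "r" :: rest)
        (acc ++ p)
termination_by (pvNZ g, st.length)
decreasing_by
  · exact Prod.Lex.right _ (by simp)
  · exact Prod.Lex.right _ (by simp)
  · exact Prod.Lex.left _ _ hdec

def dfs_alt (g : List (List Int)) (i : Int) (j : Int) (path : String) : String :=
  pvRun g [.visit i j path] ""

-- ===== PRECONDITION & SPEC =====
def Spec_dfs (g : List (List Int)) (i : Int) (j : Int) (path : String) (out : String) : Prop := out = dfs_alt g i j path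
instance (g : List (List Int)) (i : Int) (j : Int) (path : String) (out : String) : Decidable (Spec_dfs g i j path out) := by unfold Spec_dfs; infer_instance

-- ===== CLAIM (what is proved, stated in full; the proofs are below) =====
def Claim_equal_dfs : Prop := ∀ (g : List (List Int)) (i : Int) (j : Int) (path : String), Dom_dfs g i j path → Spec_dfs g i j path (dfs g i j path)

-- ===== LEMMAS AND PROOFS =====

-- processing a visit frame on the stack equals running A's recursion and continuing
theorem pvRun_visit (n : Nat) : ∀ (g : List (List Int)), pvNZ g < n →
    ∀ (i j : Int) (p : String) (rest : List PvItem) (acc : String),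
      pvRun g (.visit i j p :: rest) acc
        = pvRun (dfsB g i j p).1.2 rest (acc ++ (dfsB g i j p).1.1) := by
  induction n with
  | zero => intro g hg; omega
  | succ n ih =>
    intro g hg i j p rest acc
    by_cases h : pvBlocked g i j = true
    · rw [pvRun, dfsB]
      simp [h]
    · have hlt := pvNZ_set_lt g i j h
      rcases h1 : dfsB (pvSet g i j) (i + 1) j "d" with ⟨⟨s1, g2⟩, p2⟩
      rcases h2 : dfsB g2 (i - 1) j "u" with ⟨⟨s2, g3⟩, p3⟩
      rcases h3 : dfsB g3 i (j + 1) "r" with ⟨⟨s3, g4⟩, p4⟩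
      rcases h4 : dfsB g4 i (j - 1) "l" with ⟨⟨s4, g5⟩, p5⟩
      simp only at p2 p3 p4 p5
      rw [pvRun]
      rw [dif_neg h]
      rw [ih (pvSet g i j) (by omega) (i + 1) j "d", h1]
      rw [pvRun]
      rw [ih g2 (by omega) (i - 1) j "u", h2]
      rw [pvRun]
      rw [ih g3 (by omega) i (j + 1) "r", h3]
      rw [pvRun]
      rw [ih g4 (by omega) i (j - 1) "l", h4]
      rw [pvRun]
      rw [dfsB, dif_neg h, h1]
      dsimp only
      rw [h2]
      dsimp only
      rw [h3]
      dsimp only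
      rw [h4]
      dsimp only
      simp [String.append_assoc]

-- ===== VERDICT (by name: the statement is the Claim_ definition above) =====
theorem dfs_spec : Claim_equal_dfs := by
  intro g i j path _
  unfold Spec_dfs dfs dfs_alt
  rw [pvRun_visit (pvNZ g + 1) g (Nat.lt_succ_self _) i j path [] ""]
  simp [pvRun, String.empty_append]
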